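-- pv_equiv track=rewrite | github.com/CTLab-ITMO/IRec | modeling/rqvae/collisions.py | dedup_semantic_ids
-- ===== SOURCE A (Python) =====
-- from collections import defaultdict
--
-- def dedup_semantic_ids(semantic_ids): # TODOPK
--     result = []
--     count_dict = defaultdict(int)
--     for semantic_id in semantic_ids:
--         unique_index = count_dict[semantic_id]
--         count_dict[semantic_id] += 1
--         new_last_element = (*semantic_id, unique_index)
--         result.append(new_last_element)
--     return result
-- ===== SOURCE B (Python) =====
-- def dedup_semantic_ids(semantic_ids):
--     # Pass 1: index every semantic id by the ordered list of positions where it occurs.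
--     groups = {}
--     for i, sid in enumerate(semantic_ids):
--         groups.setdefault(sid, []).append(i)
--     # Pass 2: preallocate and fill each position with its occurrence index within its group.
--     result = [None] * len(semantic_ids)
--     for sid, positions in groups.items():
--         for occ, pos in enumerate(positions):
--             result[pos] = (*sid, occ)
--     return result
-- ===== Notes on version B (the rewrite author's own statement) =====
-- stated objective: alternative
-- what changed: Replaces the streaming running-counter loop by a two-phase group-and-scatter: one enumerate pass builds a dict from each semantic id to its ordered position list, then a preallocated result is filled by position with the occurrence index taken from each group's enumeration.
import Mathlib
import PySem

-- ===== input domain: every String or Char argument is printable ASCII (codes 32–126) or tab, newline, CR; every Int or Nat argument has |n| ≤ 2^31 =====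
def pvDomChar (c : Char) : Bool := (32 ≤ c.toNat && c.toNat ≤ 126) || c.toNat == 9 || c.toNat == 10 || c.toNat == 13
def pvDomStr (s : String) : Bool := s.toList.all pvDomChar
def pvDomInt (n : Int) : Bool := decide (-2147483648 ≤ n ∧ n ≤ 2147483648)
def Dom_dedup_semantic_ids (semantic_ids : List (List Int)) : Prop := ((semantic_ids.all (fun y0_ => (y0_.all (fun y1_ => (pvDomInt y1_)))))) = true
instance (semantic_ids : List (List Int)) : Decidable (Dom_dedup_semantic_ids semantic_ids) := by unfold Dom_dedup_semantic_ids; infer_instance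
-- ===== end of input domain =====

-- B replaces A's streaming running-counter loop by a two-phase group-then-scatter of the same cost
-- (build position lists per id, then fill a preallocated result by position): an alternative decomposition.


-- ===== PORT A =====
-- count_dict[semantic_id] on the defaultdict reads 0 for a missing key and '+= 1' stores old+1:
-- exactly Dict.getD … 0 followed by Dict.modify … 0 (· + 1).
def dedup_semantic_ids (semantic_ids : List (List Int)) : List (List Int) :=
  (semantic_ids.foldl
    (fun st semantic_id =>
      let unique_index := st.2.getD semantic_id 0
      let new_last_element := semantic_id ++ [unique_index]
      (st.1 ++ [new_last_element], st.2.modify semantic_id 0 (· + 1)))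
    (([], PySem.Dict.empty) : List (List Int) × PySem.Dict (List Int) Int)).1

-- ===== PORT B =====
-- groups.setdefault(sid, []).append(i) is Dict.modify sid [] (· ++ [i]).
-- result = [None]*n then fill; every index is written exactly once, so the final
-- '.getD []' extraction of the Options never sees a leftover None (Python returns the tuples).
def dedup_semantic_ids_alt (semantic_ids : List (List Int)) : List (List Int) :=
  let groups : PySem.Dict (List Int) (List Int) :=
    (PySem.List.enumerate semantic_ids 0).foldl
      (fun d p => d.modify p.2 [] (· ++ [p.1])) PySem.Dict.empty
  let result : List (Option (List Int)) := List.replicate semantic_ids.length none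
  let filled := groups.items.foldl
    (fun res kp =>
      (PySem.List.enumerate kp.2 0).foldl
        (fun r q => PySem.List.pySetD r q.2 (some (kp.1 ++ [q.1]))) res)
    result
  filled.map (fun o => o.getD [])

-- ===== PRECONDITION & SPEC =====
def Spec_dedup_semantic_ids (semantic_ids : List (List Int)) (out : List (List Int)) : Prop := out = dedup_semantic_ids_alt semantic_ids
instance (semantic_ids : List (List Int)) (out : List (List Int)) : Decidable (Spec_dedup_semantic_ids semantic_ids out) := by unfold Spec_dedup_semantic_ids; infer_instance

-- ===== CLAIM (what is proved, stated in full; the proofs are below) =====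
def Claim_equal_dedup_semantic_ids : Prop := ∀ (semantic_ids : List (List Int)), Dom_dedup_semantic_ids semantic_ids → Spec_dedup_semantic_ids semantic_ids (dedup_semantic_ids semantic_ids)

-- ===== LEMMAS AND PROOFS =====

-- ---- A side: the fold's dict state after a prefix 'pre' is Dict.counter pre ----
def mapA (rest : List (List Int)) (d : PySem.Dict (List Int) Int) : List (List Int) :=
  match rest with
  | [] => []
  | s :: r => (s ++ [d.getD s 0]) :: mapA r (d.modify s 0 (· + 1))

theorem A_go : ∀ (rest acc : List (List Int)) (d : PySem.Dict (List Int) Int),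
    (rest.foldl
      (fun st s =>
        let unique_index := st.2.getD s 0
        let new_last_element := s ++ [unique_index]
        (st.1 ++ [new_last_element], st.2.modify s 0 (· + 1)))
      (acc, d)).1 = acc ++ mapA rest d := by
  intro rest
  induction rest with
  | nil => intro acc d; simp [mapA]
  | cons s r ih =>
      intro acc d
      simp only [List.foldl_cons, mapA]
      rw [ih]
      simp

theorem length_mapA : ∀ (rest : List (List Int)) (d : PySem.Dict (List Int) Int),
    (mapA rest d).length = rest.length := by
  intro rest
  induction rest with
  | nil => intro d; simp [mapA]
  | cons s r ih => intro d; simp [mapA, ih]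

theorem mapA_counter_getElem? : ∀ (rest : List (List Int)) (pre : List (List Int)) (j : Nat)
    (hj : j < rest.length),
    (mapA rest (PySem.Dict.counter pre))[j]? =
      some (rest[j] ++ [(((pre ++ rest.take j).count rest[j] : Nat) : Int)]) := by
  intro rest
  induction rest with
  | nil => intro pre j hj; simp at hj
  | cons s r ih =>
      intro pre j hj
      cases j with
      | zero => simp [mapA, PySem.Dict.getD_counter]
      | succ j =>
          have hj' : j < r.length := by simpa using hj
          simp only [mapA, List.getElem?_cons_succ, ← PySem.Dict.counter_append_singleton]
          rw [ih (pre ++ [s]) j hj']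
          simp [List.append_assoc]

theorem A_getElem? (l : List (List Int)) (j : Nat) (hj : j < l.length) :
    (dedup_semantic_ids l)[j]? = some (l[j] ++ [(((l.take j).count l[j] : Nat) : Int)]) := by
  unfold dedup_semantic_ids
  rw [A_go]
  have h0 : (PySem.Dict.empty : PySem.Dict (List Int) Int) = PySem.Dict.counter [] := rfl
  rw [h0, List.nil_append, mapA_counter_getElem? l [] j hj]
  simp

theorem A_length (l : List (List Int)) : (dedup_semantic_ids l).length = l.length := by
  unfold dedup_semantic_ids
  rw [A_go]
  simp [length_mapA]

-- ---- B side: ground-truth position lists ----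
def posL (k : List Int) (s : Int) (l : List (List Int)) : List Int :=
  match l with
  | [] => []
  | x :: r => (if x = k then [s] else []) ++ posL k (s + 1) r

theorem posL_mem (k : List Int) : ∀ (l : List (List Int)) (s m : Int),
    m ∈ posL k s l → s ≤ m ∧ m < s + l.length := by
  intro l
  induction l with
  | nil => intro s m hm; simp [posL] at hm
  | cons x r ih =>
      intro s m hm
      simp only [posL, List.mem_append] at hm
      rcases hm with hm | hm
      · have hms : m = s := by split at hm <;> simp_all
        subst hms
        simp only [List.length_cons]
        push_cast
        omega
      · have := ih (s + 1) m hm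
        simp only [List.length_cons]
        push_cast
        omega

theorem posL_nodup (k : List Int) : ∀ (l : List (List Int)) (s : Int), (posL k s l).Nodup := by
  intro l
  induction l with
  | nil => intro s; simp [posL]
  | cons x r ih =>
      intro s
      by_cases hx : x = k
      · have hplist : posL k s (x :: r) = s :: posL k (s + 1) r := by simp [posL, hx]
        rw [hplist, List.nodup_cons]
        refine ⟨fun hmem => ?_, ih (s + 1)⟩
        have := posL_mem k r (s + 1) s hmem
        omega
      · have hplist : posL k s (x :: r) = posL k (s + 1) r := by simp [posL, hx]
        rw [hplist]
        exact ih (s + 1)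

theorem posL_mem_iff (k : List Int) : ∀ (l : List (List Int)) (s : Int) (j : Nat)
    (hj : j < l.length), ((s + (j : Int)) ∈ posL k s l) ↔ l[j] = k := by
  intro l
  induction l with
  | nil => intro s j hj; simp at hj
  | cons x r ih =>
      intro s j hj
      cases j with
      | zero =>
          simp only [posL, List.mem_append, Int.natCast_zero, add_zero, List.getElem_cons_zero]
          constructor
          · rintro (hm | hm)
            · split at hm <;> simp_all
            · exfalso; have := posL_mem k r (s + 1) s hm; omega
          · intro hx; left; simp [hx]
      | succ j =>
          have hj' : j < r.length := by simpa using hj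
          have harith : s + ((j : Int) + 1) = (s + 1) + (j : Int) := by ring
          simp only [posL, List.mem_append, List.getElem_cons_succ]
          push_cast
          rw [harith, ← ih (s + 1) j hj']
          constructor
          · rintro (hm | hm)
            · exfalso; split at hm <;> simp at hm; omega
            · exact hm
          · intro hm; right; exact hm

theorem posL_idxOf (k : List Int) : ∀ (l : List (List Int)) (s : Int) (j : Nat)
    (hj : j < l.length), l[j] = k →
    (posL k s l).idxOf (s + (j : Int)) = (l.take j).count k := by
  intro l
  induction l with
  | nil => intro s j hj; simp at hj
  | cons x r ih =>
      intro s j hj hk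
      cases j with
      | zero =>
          have hx : x = k := by simpa using hk
          simp [posL, hx]
      | succ j =>
          have hj' : j < r.length := by simpa using hj
          have hk' : r[j] = k := by simpa using hk
          by_cases hx : x = k
          · have hplist : posL k s (x :: r) = s :: posL k (s + 1) r := by simp [posL, hx]
            have hne : (s == s + ((j + 1 : Nat) : Int)) = false := by
              simp only [beq_eq_false_iff_ne, ne_eq]
              push_cast
              omega
            rw [hplist, List.idxOf_cons, hne, cond_false,
              show s + ((j + 1 : Nat) : Int) = (s + 1) + (j : Int) by push_cast; ring,
              ih (s + 1) j hj' hk']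
            simp [List.take_succ_cons, hx]
          · have hplist : posL k s (x :: r) = posL k (s + 1) r := by simp [posL, hx]
            rw [hplist,
              show s + ((j + 1 : Nat) : Int) = (s + 1) + (j : Int) by push_cast; ring,
              ih (s + 1) j hj' hk']
            simp [List.take_succ_cons, hx]

-- the groups dict the B port builds, looked up at k, is exactly posL k 0 l
theorem posL_bridge (k : List Int) : ∀ (l : List (List Int)) (s : Int),
    ((((PySem.List.enumerate l s).map Prod.swap).filter (fun p => p.1 == k)).map (·.2)) = posL k s l := by
  intro l
  induction l with
  | nil => intro s; simp [PySem.List.enumerate_nil, posL]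
  | cons x r ih =>
      intro s
      rw [PySem.List.enumerate_cons]
      by_cases hx : x = k
      · simp [hx, posL, ih (s + 1)]
      · simp [hx, posL, ih (s + 1)]

theorem groups_getD (l : List (List Int)) (k : List Int) :
    (((PySem.List.enumerate l 0).foldl (fun d p => d.modify p.2 [] (· ++ [p.1]))
      (PySem.Dict.empty : PySem.Dict (List Int) (List Int)))).getD k [] = posL k 0 l := by
  have hswap :
      ((PySem.List.enumerate l 0).foldl (fun d p => d.modify p.2 [] (· ++ [p.1]))
        (PySem.Dict.empty : PySem.Dict (List Int) (List Int)))
      = (((PySem.List.enumerate l 0).map Prod.swap).foldl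
          (fun d p => d.modify p.1 [] (· ++ [p.2]))
          (PySem.Dict.empty : PySem.Dict (List Int) (List Int))) := by
    rw [List.foldl_map]
    rfl
  rw [hswap, PySem.Dict.getD_foldl_modify_append]
  simp [posL_bridge k l 0]

theorem groups_keys (l : List (List Int)) :
    (((PySem.List.enumerate l 0).foldl (fun d p => d.modify p.2 [] (· ++ [p.1]))
      (PySem.Dict.empty : PySem.Dict (List Int) (List Int)))).keys = PySem.Set.ofList l := by
  rw [PySem.Dict.keys_foldl_modify_key (PySem.List.enumerate l 0) (fun p => p.2) []
    (fun _ p v => v ++ [p.1]) PySem.Dict.empty]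
  simp [PySem.List.map_snd_enumerate]
  rfl

theorem groups_keys_nodup (l : List (List Int)) :
    (((PySem.List.enumerate l 0).foldl (fun d p => d.modify p.2 [] (· ++ [p.1]))
      (PySem.Dict.empty : PySem.Dict (List Int) (List Int)))).keys.Nodup :=
  PySem.Dict.nodup_keys_foldl_modify_key _ _ _ _ _ (by simp)

-- ---- the scatter pass ----
def fillG (k : List Int) (ps : List Int) (s : Int) (res : List (Option (List Int))) :
    List (Option (List Int)) :=
  (PySem.List.enumerate ps s).foldl (fun r q => PySem.List.pySetD r q.2 (some (k ++ [q.1]))) res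

theorem fillG_length (k : List Int) : ∀ (ps : List Int) (s : Int) (res : List (Option (List Int))),
    (fillG k ps s res).length = res.length := by
  intro ps
  induction ps with
  | nil => intro s res; simp [fillG, PySem.List.enumerate_nil]
  | cons p rest ih =>
      intro s res
      simp only [fillG, PySem.List.enumerate_cons, List.foldl_cons]
      rw [show ((PySem.List.enumerate rest (s+1)).foldl
        (fun r q => PySem.List.pySetD r q.2 (some (k ++ [q.1])))
        (PySem.List.pySetD res p (some (k ++ [s])))) =
        fillG k rest (s+1) (PySem.List.pySetD res p (some (k ++ [s]))) from rfl]
      rw [ih]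
      exact PySem.List.length_pySetD res p _

theorem fillG_getElem? (k : List Int) : ∀ (ps : List Int) (s : Int)
    (res : List (Option (List Int))), ps.Nodup →
    (∀ p ∈ ps, 0 ≤ p ∧ p.toNat < res.length) → ∀ j : Nat,
    (fillG k ps s res)[j]? =
      if (j : Int) ∈ ps then some (some (k ++ [s + (ps.idxOf (j : Int) : Int)])) else res[j]? := by
  intro ps
  induction ps with
  | nil => intro s res _ _ j; simp [fillG, PySem.List.enumerate_nil]
  | cons p rest ih =>
      intro s res hnd hall j
      have hp := hall p (by simp)
      have hset : PySem.List.pySetD res p (some (k ++ [s])) = res.set p.toNat (some (k ++ [s])) :=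
        PySem.List.pySetD_of_nonneg res _ hp.1
      have hstep : fillG k (p :: rest) s res
          = fillG k rest (s + 1) (res.set p.toNat (some (k ++ [s]))) := by
        simp only [fillG, PySem.List.enumerate_cons, List.foldl_cons, hset]
      rw [hstep]
      have hall' : ∀ q ∈ rest, 0 ≤ q ∧ q.toNat < (res.set p.toNat (some (k ++ [s]))).length := by
        intro q hq
        have := hall q (by simp [hq])
        simpa using this
      rw [ih (s + 1) _ hnd.of_cons hall' j]
      by_cases hjr : (j : Int) ∈ rest
      · have hpj : p ≠ (j : Int) := by
          intro h; exact (List.nodup_cons.mp hnd).1 (h ▸ hjr)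
        have : ((j : Int) ∈ p :: rest) := by simp [hjr]
        simp only [if_pos hjr, if_pos this, List.idxOf_cons]
        have hbeq : (p == (j : Int)) = false := by simpa using hpj
        simp only [hbeq, cond_false]
        push_cast
        ring_nf
      · simp only [if_neg hjr]
        by_cases hpj : p = (j : Int)
        · have hmem : ((j : Int) ∈ p :: rest) := by simp [hpj]
          have hjlen : j < res.length := by
            have := hp.2; rw [hpj] at this; simpa using this
          have htn : p.toNat = j := by omega
          rw [if_pos hmem, htn, List.getElem?_set_self hjlen]
          simp [hpj]
        · have hmem : ¬ ((j : Int) ∈ p :: rest) := by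
            simp only [List.mem_cons, not_or]
            exact ⟨fun h => hpj h.symm, hjr⟩
          have htn : p.toNat ≠ j := by omega
          rw [if_neg hmem, List.getElem?_set_ne htn]

theorem fillAll_length (l : List (List Int)) : ∀ (ks : List (List Int))
    (res : List (Option (List Int))),
    ((ks.foldl (fun r k => fillG k (posL k 0 l) 0 r) res)).length = res.length := by
  intro ks
  induction ks with
  | nil => intro res; simp
  | cons k kr ih => intro res; rw [List.foldl_cons, ih, fillG_length]

theorem fillAll_getElem? (l : List (List Int)) : ∀ (ks : List (List Int))
    (res : List (Option (List Int))), res.length = l.length → ∀ (j : Nat) (hj : j < l.length),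
    ((ks.foldl (fun r k => fillG k (posL k 0 l) 0 r) res))[j]? =
      if l[j] ∈ ks then some (some (l[j] ++ [(((l.take j).count l[j] : Nat) : Int)])) else res[j]? := by
  intro ks
  induction ks with
  | nil => intro res hres j hj; simp
  | cons k kr ih =>
      intro res hres j hj
      rw [List.foldl_cons, ih _ (by rw [fillG_length]; exact hres) j hj]
      have hGet := fillG_getElem? k (posL k 0 l) 0 res (posL_nodup k l 0)
        (fun p hp => by
          have := posL_mem k l 0 p hp
          constructor
          · omega
          · rw [hres]; omega) j
      have hmemiff : ((j : Int) ∈ posL k 0 l) ↔ l[j] = k := by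
        have := posL_mem_iff k l 0 j hj
        simpa using this
      by_cases hkr : l[j] ∈ kr
      · simp [hkr]
      · rw [if_neg hkr, hGet]
        by_cases hlk : l[j] = k
        · rw [if_pos (hmemiff.mpr hlk), if_pos (by simp [hlk])]
          have hidx : (posL k 0 l).idxOf ((j : Int)) = (l.take j).count k := by
            have := posL_idxOf k l 0 j hj hlk
            simpa using this
          rw [hidx, hlk]
          norm_num
        · rw [if_neg (fun h => hlk (hmemiff.mp h)), if_neg (by simp [hlk, hkr])]

theorem B_getElem? (l : List (List Int)) (j : Nat) (hj : j < l.length) :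
    (dedup_semantic_ids_alt l)[j]? = some (l[j] ++ [(((l.take j).count l[j] : Nat) : Int)]) := by
  unfold dedup_semantic_ids_alt
  simp only []
  set groups := (PySem.List.enumerate l 0).foldl (fun d p => d.modify p.2 [] (· ++ [p.1]))
    (PySem.Dict.empty : PySem.Dict (List Int) (List Int)) with hgroups
  have hitems : groups.items = (PySem.Set.ofList l).map (fun k => (k, groups.getD k [])) := by
    rw [PySem.Dict.items_eq_map_keys groups (groups_keys_nodup l) [], groups_keys]
  have hfold : groups.items.foldl
      (fun res kp => (PySem.List.enumerate kp.2 0).foldl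
        (fun r q => PySem.List.pySetD r q.2 (some (kp.1 ++ [q.1]))) res)
      (List.replicate l.length none)
      = (PySem.Set.ofList l).foldl (fun r k => fillG k (posL k 0 l) 0 r)
        (List.replicate l.length none) := by
    rw [hitems, List.foldl_map]
    apply PySem.List.foldl_congr_mem'
    intro k _ acc
    show fillG k (groups.getD k []) 0 acc = fillG k (posL k 0 l) 0 acc
    rw [hgroups, groups_getD]
  rw [hfold]
  have hmem : l[j] ∈ PySem.Set.ofList l :=
    (PySem.Set.mem_ofList l _).mpr (List.getElem_mem hj)
  rw [List.getElem?_map,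
    fillAll_getElem? l (PySem.Set.ofList l) (List.replicate l.length none) (by simp) j hj,
    if_pos hmem]
  rfl

theorem B_length (l : List (List Int)) : (dedup_semantic_ids_alt l).length = l.length := by
  unfold dedup_semantic_ids_alt
  simp only []
  set groups := (PySem.List.enumerate l 0).foldl (fun d p => d.modify p.2 [] (· ++ [p.1]))
    (PySem.Dict.empty : PySem.Dict (List Int) (List Int)) with hgroups
  have hitems : groups.items = (PySem.Set.ofList l).map (fun k => (k, groups.getD k [])) := by
    rw [PySem.Dict.items_eq_map_keys groups (groups_keys_nodup l) [], groups_keys]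
  have hfold : groups.items.foldl
      (fun res kp => (PySem.List.enumerate kp.2 0).foldl
        (fun r q => PySem.List.pySetD r q.2 (some (kp.1 ++ [q.1]))) res)
      (List.replicate l.length none)
      = (PySem.Set.ofList l).foldl (fun r k => fillG k (posL k 0 l) 0 r)
        (List.replicate l.length none) := by
    rw [hitems, List.foldl_map]
    apply PySem.List.foldl_congr_mem'
    intro k _ acc
    show fillG k (groups.getD k []) 0 acc = fillG k (posL k 0 l) 0 acc
    rw [hgroups, groups_getD]
  rw [hfold, List.length_map, fillAll_length]
  simp

-- ===== VERDICT (by name: the statement is the Claim_ definition above) =====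
theorem dedup_semantic_ids_spec : Claim_equal_dedup_semantic_ids := by
  intro l _
  show dedup_semantic_ids l = dedup_semantic_ids_alt l
  apply List.ext_getElem?
  intro j
  by_cases hj : j < l.length
  · rw [A_getElem? l j hj, B_getElem? l j hj]
  · rw [List.getElem?_eq_none (by rw [A_length]; omega),
      List.getElem?_eq_none (by rw [B_length]; omega)]
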